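-- pv_equiv track=rewrite | github.com/Ze-d/LightAgent | app/core/context_builder.py | _split_memory_sections
-- ===== SOURCE A (Python) =====
-- def _split_memory_sections(memory_context: str) -> list[str]:
--     sections: list[str] = []
--     current: list[str] = []
--     for line in memory_context.splitlines():
--         if (
--             line.startswith("[")
--             and line.endswith("Memory]")
--             and current
--         ):
--             sections.append("\n".join(current).strip())
--             current = [line]
--         else:
--             current.append(line)
--     if current:
--         section = "\n".join(current).strip()
--         if section:
--             sections.append(section)
--     return sections
-- ===== SOURCE B (Python) =====
-- def _split_memory_sections(memory_context: str) -> list[str]: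
--     lines = memory_context.splitlines()
--     if not lines:
--         return []
--     parts = ["\n".join(g).strip() for g in _group(lines)]
--     if not parts[-1]:
--         parts.pop()
--     return parts
--
--
-- def _group(lines: list[str]) -> list[list[str]]:
--     # lines is non-empty: first group = lines[0] plus following non-marker lines
--     j = 1
--     while j < len(lines) and not (
--         lines[j].startswith("[") and lines[j].endswith("Memory]")
--     ):
--         j += 1
--     if j == len(lines):
--         return [lines]
--     return [lines[:j]] + _group(lines[j:])
-- ===== Notes on version B (the rewrite author's own statement) =====
-- stated objective: alternative
-- what changed: Replaces A's single stateful loop (sections/current accumulators with in-loop flushing) by a three-stage pipeline: recursively group the lines at marker boundaries, map join+strip over the groups, then drop the last part iff it is empty.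
import Mathlib
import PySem

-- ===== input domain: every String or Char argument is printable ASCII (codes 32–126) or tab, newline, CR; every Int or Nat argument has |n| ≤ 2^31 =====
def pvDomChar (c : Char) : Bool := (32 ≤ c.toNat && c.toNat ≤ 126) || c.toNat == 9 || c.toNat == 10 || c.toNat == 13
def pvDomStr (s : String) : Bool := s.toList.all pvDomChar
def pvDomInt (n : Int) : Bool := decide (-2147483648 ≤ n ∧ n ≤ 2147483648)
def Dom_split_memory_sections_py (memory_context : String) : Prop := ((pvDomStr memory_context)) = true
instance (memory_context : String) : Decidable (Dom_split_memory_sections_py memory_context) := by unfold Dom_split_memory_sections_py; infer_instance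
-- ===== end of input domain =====

-- B replaces A's single accumulator loop by a pipeline (group lines recursively, map join+strip, drop an empty last part); objective: alternative decomposition, same cost.


-- ===== PORT A =====
-- A's loop: state (sections, current); flush current when a marker line arrives and current is non-empty.
def pvALoop : List String → List String → List String → List String
  | [], sections, current =>
      if current ≠ [] then
        let section_ := PySem.Str.strip (PySem.Str.join "\n" current)
        if section_ ≠ "" then sections ++ [section_] else sections
      else sections
  | line :: rest, sections, current =>
      if PySem.Str.startswith line "[" && PySem.Str.endswith line "Memory]" && !current.isEmpty then
        pvALoop rest (sections ++ [PySem.Str.strip (PySem.Str.join "\n" current)]) [line]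
      else
        pvALoop rest sections (current ++ [line])

def split_memory_sections_py (memory_context : String) : List String :=
  pvALoop (PySem.Str.splitlines memory_context) [] []

-- ===== PORT B =====
def pvBMarker (l : String) : Bool :=
  PySem.Str.startswith l "[" && PySem.Str.endswith l "Memory]"

-- _group: first group = head plus following non-marker lines (the while loop = takeWhile), recurse on the rest.
def pvBGroup : List String → List (List String)
  | [] => []        -- never reached from B (only called on non-empty line lists)
  | h :: t =>
      match hpost : t.dropWhile (fun l => !pvBMarker l) with
      | [] => [h :: t]
      | m :: t' => (h :: t.takeWhile (fun l => !pvBMarker l)) :: pvBGroup (m :: t')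
termination_by l => l.length
decreasing_by
  have hle := List.length_dropWhile_le (p := fun l => !pvBMarker l) (l := t)
  rw [hpost] at hle
  simp at hle ⊢
  omega

def split_memory_sections_py_alt (memory_context : String) : List String :=
  let lines := PySem.Str.splitlines memory_context
  if lines.isEmpty then []
  else
    let parts := (pvBGroup lines).map (fun g => PySem.Str.strip (PySem.Str.join "\n" g))
    if parts.getLastD "" = "" then parts.dropLast else parts

-- ===== PRECONDITION & SPEC =====
def Spec_split_memory_sections_py (memory_context : String) (out : List String) : Prop := out = split_memory_sections_py_alt memory_context
instance (memory_context : String) (out : List String) : Decidable (Spec_split_memory_sections_py memory_context out) := by unfold Spec_split_memory_sections_py; infer_instance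

-- ===== CLAIM (what is proved, stated in full; the proofs are below) =====
def Claim_equal_split_memory_sections_py : Prop := ∀ (memory_context : String), Dom_split_memory_sections_py memory_context → Spec_split_memory_sections_py memory_context (split_memory_sections_py memory_context)

-- ===== LEMMAS AND PROOFS =====

-- join-and-strip of one group
def pvJS (g : List String) : String := PySem.Str.strip (PySem.Str.join "\n" g)

-- B's final adjustment: drop the last part if it is empty
def pvFin (parts : List String) : List String :=
  if parts.getLastD "" = "" then parts.dropLast else parts

-- the sections A will still emit, given pending current `cur` and remaining lines `rest`
def pvBfin (cur : List String) : List String → List String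
  | rest =>
      match hpost : rest.dropWhile (fun l => !pvBMarker l) with
      | [] =>
          if pvJS (cur ++ rest.takeWhile (fun l => !pvBMarker l)) = "" then []
          else [pvJS (cur ++ rest.takeWhile (fun l => !pvBMarker l))]
      | m :: t' => pvJS (cur ++ rest.takeWhile (fun l => !pvBMarker l)) :: pvBfin [m] t'
termination_by rest => rest.length
decreasing_by
  have hle := List.length_dropWhile_le (p := fun l => !pvBMarker l) (l := rest)
  rw [hpost] at hle
  simp at hle ⊢
  omega

lemma pvBfin_dw_nil (cur rest : List String)
    (hd : rest.dropWhile (fun l => !pvBMarker l) = []) :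
    pvBfin cur rest =
      if pvJS (cur ++ rest.takeWhile (fun l => !pvBMarker l)) = "" then []
      else [pvJS (cur ++ rest.takeWhile (fun l => !pvBMarker l))] := by
  rw [pvBfin]
  split <;> simp_all

lemma pvBfin_dw_cons (cur rest : List String) (m : String) (t' : List String)
    (hd : rest.dropWhile (fun l => !pvBMarker l) = m :: t') :
    pvBfin cur rest = pvJS (cur ++ rest.takeWhile (fun l => !pvBMarker l)) :: pvBfin [m] t' := by
  rw [pvBfin]
  split <;> simp_all

lemma pvBGroup_dw_nil (h : String) (t : List String)
    (hd : t.dropWhile (fun l => !pvBMarker l) = []) :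
    pvBGroup (h :: t) = [h :: t] := by
  rw [pvBGroup]
  split <;> simp_all

lemma pvBGroup_dw_cons (h : String) (t : List String) (m : String) (t' : List String)
    (hd : t.dropWhile (fun l => !pvBMarker l) = m :: t') :
    pvBGroup (h :: t) = (h :: t.takeWhile (fun l => !pvBMarker l)) :: pvBGroup (m :: t') := by
  rw [pvBGroup]
  split <;> simp_all

lemma pvBfin_cons_marker (cur : List String) (l : String) (t : List String)
    (hl : pvBMarker l = true) :
    pvBfin cur (l :: t) = pvJS cur :: pvBfin [l] t := by
  rw [pvBfin_dw_cons cur (l :: t) l t (by simp [hl])]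
  simp [hl]

lemma pvBfin_cons_notmarker (cur : List String) (l : String) (t : List String)
    (hl : pvBMarker l = false) :
    pvBfin cur (l :: t) = pvBfin (cur ++ [l]) t := by
  have hdw : (l :: t).dropWhile (fun l => !pvBMarker l) = t.dropWhile (fun l => !pvBMarker l) := by
    simp [hl]
  have htw : (l :: t).takeWhile (fun l => !pvBMarker l) = l :: t.takeWhile (fun l => !pvBMarker l) := by
    simp [hl]
  cases hdt : t.dropWhile (fun l => !pvBMarker l) with
  | nil =>
      rw [pvBfin_dw_nil cur (l :: t) (hdw.trans hdt), pvBfin_dw_nil (cur ++ [l]) t hdt, htw]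
      simp
  | cons m t' =>
      rw [pvBfin_dw_cons cur (l :: t) m t' (hdw.trans hdt), pvBfin_dw_cons (cur ++ [l]) t m t' hdt, htw]
      simp

lemma pvALoop_eq_Bfin (rest : List String) :
    ∀ cur sections, cur ≠ [] →
    pvALoop rest sections cur = sections ++ pvBfin cur rest := by
  induction rest with
  | nil =>
      intro cur sections hcur
      rw [pvALoop, pvBfin_dw_nil cur [] rfl]
      simp [hcur, pvJS]
      split <;> simp
  | cons l t ih =>
      intro cur sections hcur
      have hc : cur.isEmpty = false := by
        cases cur with | nil => exact absurd rfl hcur | cons a b => rfl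
      rw [pvALoop]
      have hcond : (PySem.Str.startswith l "[" && PySem.Str.endswith l "Memory]" && !cur.isEmpty)
          = pvBMarker l := by rw [pvBMarker, hc]; simp
      rw [hcond]
      by_cases hl : pvBMarker l = true
      · rw [if_pos (by simp [hl]), ih [l] _ (by simp), pvBfin_cons_marker cur l t hl]
        simp [pvJS]
      · have hl' : pvBMarker l = false := by simpa using hl
        rw [if_neg (by simp [hl']), ih (cur ++ [l]) _ (by simp),
            pvBfin_cons_notmarker cur l t hl']

lemma pvBGroup_cons_ne_nil (h : String) (t : List String) : pvBGroup (h :: t) ≠ [] := by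
  cases hdt : t.dropWhile (fun l => !pvBMarker l) with
  | nil => rw [pvBGroup_dw_nil h t hdt]; simp
  | cons m t' => rw [pvBGroup_dw_cons h t m t' hdt]; simp

lemma pvFin_cons (x : String) (l : List String) (hl : l ≠ []) :
    pvFin (x :: l) = x :: pvFin l := by
  cases l with
  | nil => exact absurd rfl hl
  | cons a b =>
      unfold pvFin
      rw [show ((x :: a :: b).getLastD "") = b.getLastD a by rw [List.getLastD_cons, List.getLastD_cons],
          show ((a :: b).getLastD "") = b.getLastD a by rw [List.getLastD_cons]]
      split <;> rfl

lemma pvBfin_eq_pipeline : ∀ (n : Nat) (t : List String) (h : String), t.length ≤ n →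
    pvBfin [h] t = pvFin ((pvBGroup (h :: t)).map pvJS) := by
  intro n
  induction n with
  | zero =>
      intro t h ht
      have ht0 : t = [] := by cases t <;> simp_all
      subst ht0
      rw [pvBfin_dw_nil [h] [] rfl, pvBGroup_dw_nil h [] rfl]
      simp [pvFin]
  | succ n ih =>
      intro t h ht
      cases hdt : t.dropWhile (fun l => !pvBMarker l) with
      | nil =>
          have htw : t.takeWhile (fun l => !pvBMarker l) = t := by
            have := List.takeWhile_append_dropWhile (p := fun l => !pvBMarker l) (l := t)
            rw [hdt] at this; simpa using this
          rw [pvBfin_dw_nil [h] t hdt, pvBGroup_dw_nil h t hdt, htw]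
          simp [pvFin]
      | cons m t' =>
          have hle := List.length_dropWhile_le (p := fun l => !pvBMarker l) (l := t)
          rw [hdt] at hle
          simp at hle
          rw [pvBfin_dw_cons [h] t m t' hdt, pvBGroup_dw_cons h t m t' hdt,
              ih t' m (by omega), List.map_cons,
              pvFin_cons _ _ (by simp [pvBGroup_cons_ne_nil])]
          simp

-- ===== VERDICT (by name: the statement is the Claim_ definition above) =====
theorem split_memory_sections_py_spec : Claim_equal_split_memory_sections_py := by
  intro mc _
  unfold Spec_split_memory_sections_py split_memory_sections_py split_memory_sections_py_alt
  cases hls : PySem.Str.splitlines mc with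
  | nil => simp [pvALoop]
  | cons h t =>
      rw [pvALoop]
      rw [if_neg (by simp)]
      simp only [List.nil_append]
      rw [pvALoop_eq_Bfin t [h] [] (by simp)]
      rw [pvBfin_eq_pipeline t.length t h le_rfl]
      rfl
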